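/- GENERATED by mk_final_copies.py from the proof of the farm's unit `vorbis_decode_packet_rest.4a` (farm:vorbis_decode_packet_rest.4a.1: Proof.lean) as the
   re-elaboration sweep compiled it — do not edit. -/
import Asan.CheckWalk
import Vorbis.Spec.Units.vorbis_decode_packet_rest_4a
import Vorbis.Spec.Worked.vorbis_decode_packet_rest_4a_Lemmas

open X86 X86.User Asan Vorbis Vorbis.Spec Vorbis.Spec.vorbis_decode_packet_rest

/-- Segment .4a of `vorbis_decode_packet_rest` (0x110d0a … : the test of the `k` loop, the load of the subclass book, the
`book < 0` arm): from the loop head `At4K … k` to `At3 … (j + 1)` (`k = cdim`: lemma `segA_exit`), or to the loop head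
`At4K … (k + 1)` / the cut 0x110d5c `At4b` (`k < cdim`: lemma `segA_body`). -/
theorem Vorbis.Spec.Worked.vorbis_decode_packet_rest_4a_ok : Vorbis.Spec.vorbis_decode_packet_rest_4a.Statement := by
  intro Lay hLay μ hμ u₀ hcode hs2 hl2
  intro others frames len Ar stored room mode ysz e ret i j k v hat
  by_cases hk : k = slot32 e v 0x10
  · -- 0x110d11 taken: `++j`, the head of the partition loop (stb_vorbis_fixed.c:3242)
    have h1 := Vorbis.Spec.vorbis_decode_packet_rest_4a.segA_exit hLay hμ hcode others frames len Ar stored room mode ysz e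
      ret i j k v hat hk
    exact h1.mono (fun w hw => Or.inl hw)
  · -- 0x110d11 not taken: the body of the `k` loop (stb_vorbis_fixed.c:3253)
    have hlt : k < slot32 e v 0x10 := by
      have hle := hat.k_le
      omega
    have h1 := Vorbis.Spec.vorbis_decode_packet_rest_4a.segA_body hLay hμ hcode hs2 hl2 others frames len Ar stored room mode
      ysz e ret i j k v hat hlt
    exact h1.mono (fun w hw => Or.inr hw)
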